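-- pv_equiv track=rewrite | github.com/RawIron/jotting-python | mini_sim/elevator.py | split_on_direction
-- ===== SOURCE A (Python) =====
-- def split_on_direction(position, requests):
--     serve_down = []
--     serve_up = []
--     for r in sorted(requests):
--         if r < position:
--             serve_down.append(r)
--         elif r > position:
--             serve_up.append(r)
--     return serve_down[::-1], serve_up
-- ===== SOURCE B (Python) =====
-- def _merge(xs, ys, le):
--     out = []
--     i = j = 0
--     while i < len(xs) and j < len(ys):
--         if le(xs[i], ys[j]):
--             out.append(xs[i])
--             i += 1
--         else:
--             out.append(ys[j])
--             j += 1
--     out.extend(xs[i:])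
--     out.extend(ys[j:])
--     return out
--
--
-- def _msort(xs, le):
--     if len(xs) <= 1:
--         return list(xs)
--     mid = len(xs) // 2
--     return _merge(_msort(xs[:mid], le), _msort(xs[mid:], le), le)
--
--
-- def split_on_direction(position, requests):
--     serve_down = [r for r in requests if r < position]
--     serve_up = [r for r in requests if r > position]
--     return _msort(serve_down, lambda a, b: a >= b), _msort(serve_up, lambda a, b: a <= b)
-- ===== Notes on version B (the rewrite author's own statement) =====
-- stated objective: alternative
-- what changed: B partitions first with two filters and then sorts each bucket with a hand-written comparator-parameterised top-down merge sort (descending comparator for the below-position bucket), instead of A's single builtin sort followed by a partitioning append loop and a reversing slice.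
import Mathlib
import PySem

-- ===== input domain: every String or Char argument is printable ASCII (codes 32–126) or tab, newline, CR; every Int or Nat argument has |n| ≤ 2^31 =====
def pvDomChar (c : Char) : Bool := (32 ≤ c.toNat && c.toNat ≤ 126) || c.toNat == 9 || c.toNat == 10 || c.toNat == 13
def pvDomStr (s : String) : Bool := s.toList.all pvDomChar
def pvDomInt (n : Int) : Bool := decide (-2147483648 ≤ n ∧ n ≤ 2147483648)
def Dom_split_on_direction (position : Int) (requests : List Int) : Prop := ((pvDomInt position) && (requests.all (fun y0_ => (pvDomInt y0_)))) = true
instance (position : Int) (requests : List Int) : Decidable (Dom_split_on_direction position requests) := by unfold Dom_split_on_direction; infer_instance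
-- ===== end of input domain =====

-- B partitions first with two filters and sorts each bucket by a hand-written comparator-parameterised
-- top-down merge sort (descending comparator below position), instead of A's single builtin sort,
-- partitioning append loop and reversing slice (alternative algorithm, same asymptotic cost).


-- ===== PORT A =====
def split_on_direction (position : Int) (requests : List Int) : List Int × List Int :=
  let p := (PySem.List.sorted requests (fun r => r) false).foldl
    (fun (acc : List Int × List Int) r =>
      if r < position then (acc.1 ++ [r], acc.2)
      else if r > position then (acc.1, acc.2 ++ [r])
      else acc) ([], [])
  ((PySem.List.slice? p.1 none none (-1)).getD [], p.2)

-- ===== PORT B =====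
-- _merge(xs, ys, le): the Python while-loop over indices i/j, as the obvious structural recursion
def pvMerge (le : Int → Int → Bool) : List Int → List Int → List Int
  | [], ys => ys
  | x :: xs, [] => x :: xs
  | x :: xs, y :: ys => if le x y then x :: pvMerge le xs (y :: ys) else y :: pvMerge le (x :: xs) ys

-- _msort(xs, le): top-down merge sort splitting at len(xs) // 2
def pvMsort (le : Int → Int → Bool) (xs : List Int) : List Int :=
  if xs.length ≤ 1 then xs
  else pvMerge le (pvMsort le (xs.take (xs.length / 2))) (pvMsort le (xs.drop (xs.length / 2)))
termination_by xs.length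
decreasing_by
  · simp only [List.length_take]; omega
  · simp only [List.length_drop]; omega

def split_on_direction_alt (position : Int) (requests : List Int) : List Int × List Int :=
  (pvMsort (fun a b => decide (b ≤ a)) (requests.filter (fun r => decide (r < position))),
   pvMsort (fun a b => decide (a ≤ b)) (requests.filter (fun r => decide (r > position))))

-- ===== PRECONDITION & SPEC =====
def Spec_split_on_direction (position : Int) (requests : List Int) (out : List Int × List Int) : Prop := out = split_on_direction_alt position requests
instance (position : Int) (requests : List Int) (out : List Int × List Int) : Decidable (Spec_split_on_direction position requests out) := by unfold Spec_split_on_direction; infer_instance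

-- ===== CLAIM (what is proved, stated in full; the proofs are below) =====
def Claim_equal_split_on_direction : Prop := ∀ (position : Int) (requests : List Int), Dom_split_on_direction position requests → Spec_split_on_direction position requests (split_on_direction position requests)

-- ===== LEMMAS AND PROOFS =====

-- A's loop over the sorted list is a pair of filters appended to the accumulators.
lemma fold_A (position : Int) (l d u : List Int) :
    l.foldl (fun (acc : List Int × List Int) r =>
      if r < position then (acc.1 ++ [r], acc.2)
      else if r > position then (acc.1, acc.2 ++ [r])
      else acc) (d, u)
    = (d ++ l.filter (fun r => decide (r < position)),
       u ++ l.filter (fun r => decide (r > position))) := by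
  induction l generalizing d u with
  | nil => simp
  | cons x xs ih =>
    simp only [List.foldl_cons, List.filter_cons]
    split_ifs with h1 h2 <;> simp_all <;> omega

-- B's hand-written merge is core List.merge
lemma pvMerge_eq (le : Int → Int → Bool) (xs ys : List Int) :
    pvMerge le xs ys = List.merge xs ys le := by
  fun_induction pvMerge <;> simp_all

lemma pvMsort_perm (le : Int → Int → Bool) (xs : List Int) :
    (pvMsort le xs).Perm xs := by
  fun_induction pvMsort with
  | case1 => exact List.Perm.refl _
  | case2 xs h ih1 ih2 =>
    rw [pvMerge_eq]
    exact ((List.merge_perm_append le).trans (ih1.append ih2)).trans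
      (by rw [List.take_append_drop])

lemma pvMsort_pairwise (le : Int → Int → Bool)
    (htrans : ∀ a b c, le a b = true → le b c = true → le a c = true)
    (htotal : ∀ a b, (le a b || le b a) = true) (xs : List Int) :
    (pvMsort le xs).Pairwise (fun a b => le a b = true) := by
  fun_induction pvMsort with
  | case1 xs h =>
    rcases xs with _ | ⟨a, _ | ⟨b, t⟩⟩ <;> simp_all
  | case2 xs h ih1 ih2 =>
    rw [pvMerge_eq]
    exact List.pairwise_merge htrans htotal _ _ ih1 ih2

-- a ≤-sorted (resp. ≥-sorted) rearrangement of a list of ints is unique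
lemma perm_sorted_le_eq (l₁ l₂ : List Int) (hp : l₁.Perm l₂)
    (h1 : l₁.Pairwise (· ≤ ·)) (h2 : l₂.Pairwise (· ≤ ·)) : l₁ = l₂ :=
  List.Perm.eq_of_pairwise (fun _ _ _ _ x y => le_antisymm x y) h1 h2 hp

lemma perm_sorted_ge_eq (l₁ l₂ : List Int) (hp : l₁.Perm l₂)
    (h1 : l₁.Pairwise (fun a b => b ≤ a)) (h2 : l₂.Pairwise (fun a b => b ≤ a)) : l₁ = l₂ :=
  List.Perm.eq_of_pairwise (fun _ _ _ _ x y => le_antisymm y x) h1 h2 hp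

-- ===== VERDICT (by name: the statement is the Claim_ definition above) =====
theorem split_on_direction_spec : Claim_equal_split_on_direction := by
  intro position requests _
  unfold Spec_split_on_direction split_on_direction split_on_direction_alt
  simp only [fold_A, List.nil_append, PySem.List.slice?_none_none_neg_one, Option.getD_some]
  have hperm := PySem.List.sorted_perm requests (fun r => r) false
  have hpair := PySem.List.sorted_pairwise requests (fun r => r)
  refine Prod.ext ?_ ?_
  · refine perm_sorted_ge_eq _ _ ?_ ?_ ?_
    · exact (List.reverse_perm _).trans ((hperm.filter _).trans (pvMsort_perm _ _).symm)
    · exact (hpair.filter _).reverse.imp (by intro a b h; simpa using h)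
    · exact (pvMsort_pairwise _ (by intro a b c x y; simp at x y ⊢; omega)
        (by intro a b; simp; omega) _).imp (by intro a b h; simpa using h)
  · refine perm_sorted_le_eq _ _ ?_ ?_ ?_
    · exact (hperm.filter _).trans (pvMsort_perm _ _).symm
    · exact (hpair.filter _).imp (by intro a b h; simpa using h)
    · exact (pvMsort_pairwise _ (by intro a b c x y; simp at x y ⊢; omega)
        (by intro a b; simp; omega) _).imp (by intro a b h; simpa using h)
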